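-- pv_equiv track=rewrite | github.com/talen2012/00_task_tool | 05_bid_info_stat/bid_analysis_tool.py | _get_keyword_best_match
-- ===== SOURCE A (Python) =====
-- def _get_keyword_best_match(text, keyword_map, default_val):
--     if not keyword_map:
--         return default_val
--     hit_counts = {k: 0 for k in keyword_map.keys()}
--     for k, kws in keyword_map.items():
--         for kw in kws:
--             if kw in text:
--                 hit_counts[k] += 1
--     max_hits = max(hit_counts.values())
--     if max_hits > 0:
--         for k, count in hit_counts.items():
--             if count == max_hits:
--                 return k
--     return default_val
-- ===== SOURCE B (Python) =====
-- def _get_keyword_best_match(text, keyword_map, default_val):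
--     best_key, best_hits = default_val, 0
--     for k, kws in keyword_map.items():
--         hits = sum(kw in text for kw in kws)
--         if hits > best_hits:
--             best_key, best_hits = k, hits
--     return best_key
-- ===== Notes on version B (the rewrite author's own statement) =====
-- stated objective: simpler
-- what changed: A builds a per-category hit-count dict, then takes max over its values and re-scans the dict for the first key reaching it; B is a single pass keeping a running (best_key, best_hits) pair with strict '>' so the first maximum wins and no dict, max() call or second scan exists.
import Mathlib
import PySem

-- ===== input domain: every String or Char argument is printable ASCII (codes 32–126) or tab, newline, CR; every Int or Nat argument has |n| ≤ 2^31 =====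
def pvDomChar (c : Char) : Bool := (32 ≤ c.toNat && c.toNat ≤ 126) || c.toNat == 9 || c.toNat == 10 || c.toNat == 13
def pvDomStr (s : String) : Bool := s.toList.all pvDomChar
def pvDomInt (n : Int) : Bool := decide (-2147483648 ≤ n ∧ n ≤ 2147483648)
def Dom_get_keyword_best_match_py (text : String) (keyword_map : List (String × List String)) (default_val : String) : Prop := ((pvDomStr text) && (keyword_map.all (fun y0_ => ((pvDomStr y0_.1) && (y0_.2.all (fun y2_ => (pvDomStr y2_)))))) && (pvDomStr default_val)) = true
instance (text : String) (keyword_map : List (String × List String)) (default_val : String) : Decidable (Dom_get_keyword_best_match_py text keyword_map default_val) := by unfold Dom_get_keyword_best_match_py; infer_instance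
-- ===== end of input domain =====

-- B is a single pass with a running (best_key, best_hits) pair instead of A's
-- hit-count dict + max() + second scan; the return values are proved equal.

-- ===== PORT A =====
-- A's final 'for k, count in hit_counts.items(): if count == max_hits: return k' loop
def pvScanEq (items : List (String × Int)) (m : Int) (dv : String) : String :=
  match items with
  | [] => dv
  | (k, c) :: rest => if c = m then k else pvScanEq rest m dv

def get_keyword_best_match_py (text : String) (keyword_map : List (String × List String)) (default_val : String) : String :=
  if keyword_map = [] then default_val
  else
    -- hit_counts = {k: 0 for k in keyword_map.keys()}
    let hit0 : PySem.Dict String Int :=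
      keyword_map.foldl (fun d p => d.insert p.1 0) PySem.Dict.empty
    -- for k, kws in keyword_map.items(): for kw in kws: if kw in text: hit_counts[k] += 1
    let hit_counts : PySem.Dict String Int :=
      keyword_map.foldl
        (fun d p => p.2.foldl
          (fun d kw => if PySem.Str.isIn kw text then d.modify p.1 0 (· + 1) else d) d)
        hit0
    -- max_hits = max(hit_counts.values())  (values nonempty here; getD 0 is the unreachable branch)
    let max_hits : Int := (PySem.List.max? hit_counts.values (fun v => v)).getD 0
    if max_hits > 0 then pvScanEq hit_counts.items max_hits default_val
    else default_val

-- ===== PORT B =====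
def get_keyword_best_match_py_alt (text : String) (keyword_map : List (String × List String)) (default_val : String) : String :=
  (keyword_map.foldl
    (fun (b : String × Int) p =>
      -- hits = sum(kw in text for kw in kws)  (a 0/1-sum is countP)
      let hits : Int := (p.2.countP (fun kw => PySem.Str.isIn kw text) : Int)
      if b.2 < hits then (p.1, hits) else b)
    (default_val, 0)).1

-- ===== PRECONDITION & SPEC =====
-- Pre_ requires the association list's keys to be distinct: the Python argument is a
-- dict, whose key set is always duplicate-free, so no Python-reachable input is excluded;
-- on duplicate-key lists the encoding corresponds to no dict and A's accumulation is accidental.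
def Pre_get_keyword_best_match_py (text : String) (keyword_map : List (String × List String)) (default_val : String) : Prop :=
  (keyword_map.map Prod.fst).Nodup
instance (text : String) (keyword_map : List (String × List String)) (default_val : String) : Decidable (Pre_get_keyword_best_match_py text keyword_map default_val) := by unfold Pre_get_keyword_best_match_py; infer_instance

def pvWitness_get_keyword_best_match_py : String × (List (String × List String)) × String :=
  ("big data cloud", [("it", ["cloud", "ai"]), ("build", ["road"])], "other")

def Spec_get_keyword_best_match_py (text : String) (keyword_map : List (String × List String)) (default_val : String) (out : String) : Prop := out = get_keyword_best_match_py_alt text keyword_map default_val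
instance (text : String) (keyword_map : List (String × List String)) (default_val : String) (out : String) : Decidable (Spec_get_keyword_best_match_py text keyword_map default_val out) := by unfold Spec_get_keyword_best_match_py; infer_instance

-- ===== CLAIM (what is proved, stated in full; the proofs are below) =====
def Claim_equal_get_keyword_best_match_py : Prop := ∀ (text : String) (keyword_map : List (String × List String)) (default_val : String), Dom_get_keyword_best_match_py text keyword_map default_val → Pre_get_keyword_best_match_py text keyword_map default_val → Spec_get_keyword_best_match_py text keyword_map default_val (get_keyword_best_match_py text keyword_map default_val)

-- ===== LEMMAS AND PROOFS =====

-- inner keyword loop: getD after the fold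
lemma pv_inner_getD (pred : String → Bool) (key : String) (kws : List String)
    (d : PySem.Dict String Int) (x : String) :
    (kws.foldl (fun d kw => if pred kw then d.modify key 0 (· + 1) else d) d).getD x 0
      = d.getD x 0 + if x = key then ((kws.countP pred : Nat) : Int) else 0 := by
  induction kws generalizing d with
  | nil => simp
  | cons kw rest ih =>
    simp only [List.foldl_cons, List.countP_cons]
    by_cases hp : pred kw
    · rw [if_pos hp, ih, PySem.Dict.getD_modify]
      by_cases hx : x = key <;> simp [hx, hp] <;> ring
    · simp [hp, ih]

-- inner keyword loop keeps the key list when the key is present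
lemma pv_inner_keys (pred : String → Bool) (key : String) (kws : List String)
    (d : PySem.Dict String Int) (h : d.contains key = true) :
    (kws.foldl (fun d kw => if pred kw then d.modify key 0 (· + 1) else d) d).keys = d.keys := by
  induction kws generalizing d with
  | nil => rfl
  | cons kw rest ih =>
    simp only [List.foldl_cons]
    by_cases hp : pred kw
    · rw [if_pos hp, ih]
      · rw [PySem.Dict.keys_modify, PySem.Dict.keys_insert_of_contains d _ h]
      · rw [PySem.Dict.contains_modify]; simp
    · rw [if_neg hp, ih _ h]

lemma pv_inner_contains (pred : String → Bool) (key : String) (kws : List String)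
    (d : PySem.Dict String Int) (x : String) (h : d.contains key = true) :
    (kws.foldl (fun d kw => if pred kw then d.modify key 0 (· + 1) else d) d).contains x
      = d.contains x := by
  rw [PySem.Dict.contains_eq_decide_mem_keys, PySem.Dict.contains_eq_decide_mem_keys,
    pv_inner_keys pred key kws d h]

-- outer loop keeps the key list
lemma pv_outer_keys (pred : String → Bool) (l : List (String × List String))
    (d : PySem.Dict String Int) (h : ∀ p ∈ l, d.contains p.1 = true) :
    (l.foldl (fun d p => p.2.foldl
        (fun d kw => if pred kw then d.modify p.1 0 (· + 1) else d) d) d).keys = d.keys := by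
  induction l generalizing d with
  | nil => rfl
  | cons p rest ih =>
    simp only [List.foldl_cons]
    rw [ih]
    · exact pv_inner_keys pred p.1 p.2 d (h p (List.mem_cons_self))
    · intro q hq
      rw [pv_inner_contains pred p.1 p.2 d q.1 (h p (List.mem_cons_self))]
      exact h q (List.mem_cons_of_mem _ hq)

lemma pv_outer_getD (pred : String → Bool) (l : List (String × List String))
    (d : PySem.Dict String Int) (h : ∀ p ∈ l, d.contains p.1 = true) (x : String) :
    (l.foldl (fun d p => p.2.foldl
        (fun d kw => if pred kw then d.modify p.1 0 (· + 1) else d) d) d).getD x 0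
      = d.getD x 0
        + (l.map (fun q => if x = q.1 then ((q.2.countP pred : Nat) : Int) else 0)).sum := by
  induction l generalizing d with
  | nil => simp
  | cons p rest ih =>
    simp only [List.foldl_cons, List.map_cons, List.sum_cons]
    rw [ih]
    · rw [pv_inner_getD]; ring
    · intro q hq
      rw [pv_inner_contains pred p.1 p.2 d q.1 (h p (List.mem_cons_self))]
      exact h q (List.mem_cons_of_mem _ hq)

lemma pv_sum_zero (c : (String × List String) → Int) (l : List (String × List String))
    (x : String) (h : x ∉ l.map Prod.fst) :
    (l.map (fun q => if x = q.1 then c q else 0)).sum = 0 := by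
  induction l with
  | nil => simp
  | cons q rest ih =>
    simp only [List.map_cons, List.mem_cons, not_or] at h ⊢
    simp [List.sum_cons, h.1, ih h.2]

lemma pv_sum_single (c : (String × List String) → Int) (l : List (String × List String))
    (p : String × List String) (hp : p ∈ l) (hnd : (l.map Prod.fst).Nodup) :
    (l.map (fun q => if p.1 = q.1 then c q else 0)).sum = c p := by
  induction l with
  | nil => cases hp
  | cons q rest ih =>
    simp only [List.map_cons, List.nodup_cons] at hnd
    rcases List.mem_cons.mp hp with rfl | hp'
    · simp [List.sum_cons, pv_sum_zero c rest p.1 hnd.1]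
    · have hne : p.1 ≠ q.1 := by
        intro e
        exact hnd.1 (e ▸ List.mem_map.mpr ⟨p, hp', rfl⟩)
      simp [List.sum_cons, hne, ih hp' hnd.2]

-- the hit-count dict built by A, characterised as a map over keyword_map
lemma pv_hc_items (pred : String → Bool) (km : List (String × List String))
    (hnd : (km.map Prod.fst).Nodup) :
    (km.foldl (fun d p => p.2.foldl
        (fun d kw => if pred kw then d.modify p.1 0 (· + 1) else d) d)
      (km.foldl (fun d p => d.insert p.1 0) (PySem.Dict.empty : PySem.Dict String Int))).items
      = km.map (fun p => (p.1, ((p.2.countP pred : Nat) : Int))) := by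
  have h0items : (km.foldl (fun d p => d.insert p.1 0)
      (PySem.Dict.empty : PySem.Dict String Int)).items
      = km.map (fun p => (p.1, (0 : Int))) := by
    have := PySem.Dict.items_foldl_insert_fresh km Prod.fst (fun _ => (0 : Int))
      PySem.Dict.empty (fun a _ => by simp) hnd
    simpa using this
  set hit0 := km.foldl (fun d p => d.insert p.1 0) (PySem.Dict.empty : PySem.Dict String Int) with hh0
  have h0keys : hit0.keys = km.map Prod.fst := by
    simp [PySem.Dict.keys, h0items, List.map_map, Function.comp]
  have h0nodup : hit0.keys.Nodup := h0keys ▸ hnd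
  have hcont : ∀ p ∈ km, hit0.contains p.1 = true := by
    intro p hp
    rw [PySem.Dict.contains_eq_decide_mem_keys, h0keys]
    simp only [decide_eq_true_eq]
    exact List.mem_map.mpr ⟨p, hp, rfl⟩
  set hc := km.foldl (fun d p => p.2.foldl
      (fun d kw => if pred kw then d.modify p.1 0 (· + 1) else d) d) hit0 with hhc
  have hckeys : hc.keys = km.map Prod.fst := by
    rw [hhc, pv_outer_keys pred km hit0 hcont, h0keys]
  have hcnodup : hc.keys.Nodup := hckeys ▸ hnd
  rw [PySem.Dict.items_eq_map_keys hc hcnodup 0, hckeys, List.map_map]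
  apply List.map_congr_left
  intro p hp
  simp only [Function.comp]
  congr 1
  have h0getD : hit0.getD p.1 0 = 0 :=
    PySem.Dict.getD_of_mem_items hit0 (h0items ▸ List.mem_map.mpr ⟨p, hp, rfl⟩) h0nodup 0
  rw [hhc, pv_outer_getD pred km hit0 hcont, h0getD, zero_add,
    pv_sum_single _ km p hp hnd]

lemma pvScanEq_congr (cs : List (String × Int)) (m : Int) (d1 d2 : String)
    (h : m ∈ cs.map Prod.snd) : pvScanEq cs m d1 = pvScanEq cs m d2 := by
  induction cs with
  | nil => cases h
  | cons p rest ih =>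
    simp only [List.map_cons, List.mem_cons] at h
    by_cases hc : p.2 = m
    · simp [pvScanEq, hc]
    · have : m ∈ rest.map Prod.snd := h.resolve_left (fun e => hc e.symm)
      cases p with
      | mk k c => simp only [pvScanEq] at hc ⊢; rw [if_neg hc, if_neg hc, ih this]

-- B's running-best fold, characterised by running max + first-attaining scan
lemma pv_bfold (cs : List (String × Int)) (b : String × Int) :
    (cs.foldl (fun b p => if b.2 < p.2 then p else b) b).2
        = (cs.map Prod.snd).foldl max b.2
    ∧ (cs.foldl (fun b p => if b.2 < p.2 then p else b) b).1
        = if b.2 < (cs.map Prod.snd).foldl max b.2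
          then pvScanEq cs ((cs.map Prod.snd).foldl max b.2) b.1 else b.1 := by
  induction cs generalizing b with
  | nil => simp
  | cons p rest ih =>
    simp only [List.foldl_cons, List.map_cons]
    by_cases h : b.2 < p.2
    · rw [if_pos h]
      have hM : max b.2 p.2 = p.2 := max_eq_right h.le
      have hle : p.2 ≤ (rest.map Prod.snd).foldl max p.2 :=
        (PySem.List.le_foldl_max (rest.map Prod.snd) p.2).1
      obtain ⟨ih2, ih1⟩ := ih p
      refine ⟨by rw [ih2, hM], ?_⟩
      rw [ih1, hM, if_pos (lt_of_lt_of_le h hle)]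
      by_cases he : p.2 = (rest.map Prod.snd).foldl max p.2
      · rw [if_neg (by omega), ← he]
        cases p with
        | mk k c => simp [pvScanEq]
      · have hlt : p.2 < (rest.map Prod.snd).foldl max p.2 := lt_of_le_of_ne hle he
        rw [if_pos hlt]
        have hmem : (rest.map Prod.snd).foldl max p.2 ∈ rest.map Prod.snd :=
          (PySem.List.foldl_max_mem (rest.map Prod.snd) p.2).resolve_left
            (fun e => he e.symm)
        cases p with
        | mk k c =>
          simp only [pvScanEq]
          rw [if_neg (by simp at hlt ⊢; omega)]
          exact pvScanEq_congr rest _ k b.1 hmem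
    · rw [if_neg h]
      have hM : max b.2 p.2 = b.2 := max_eq_left (by omega)
      obtain ⟨ih2, ih1⟩ := ih b
      refine ⟨by rw [hM, ih2], ?_⟩
      rw [hM, ih1]
      by_cases hlt : b.2 < (rest.map Prod.snd).foldl max b.2
      · rw [if_pos hlt, if_pos hlt]
        have hp2 : p.2 ≤ b.2 := by omega
        cases p with
        | mk k c =>
          simp only [pvScanEq]
          rw [if_neg (by simp at hp2 ⊢; omega)]
      · rw [if_neg hlt, if_neg hlt]

lemma pv_main : ∀ (text : String) (km : List (String × List String)) (dv : String),
    (km.map Prod.fst).Nodup →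
    get_keyword_best_match_py text km dv = get_keyword_best_match_py_alt text km dv := by
  intro text km dv hnd
  unfold get_keyword_best_match_py get_keyword_best_match_py_alt
  by_cases hkm : km = []
  · subst hkm; simp
  · rw [if_neg hkm]
    have hitems := pv_hc_items (fun kw => PySem.Str.isIn kw text) km hnd
    set cs : List (String × Int) :=
      km.map (fun p => (p.1, ((p.2.countP (fun kw => PySem.Str.isIn kw text) : Nat) : Int))) with hcs
    -- B's fold over km is the generic fold over cs
    have hB : (km.foldl (fun (b : String × Int) p =>
          let hits : Int := (p.2.countP (fun kw => PySem.Str.isIn kw text) : Int)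
          if b.2 < hits then (p.1, hits) else b) (dv, 0))
        = cs.foldl (fun b p => if b.2 < p.2 then p else b) (dv, 0) := by
      rw [hcs, List.foldl_map]
    rw [hB]
    obtain ⟨hb2, hb1⟩ := pv_bfold cs (dv, 0)
    rw [hb1]
    -- values of the hit-count dict
    have hvals : (km.foldl (fun d p => p.2.foldl
          (fun d kw => if PySem.Str.isIn kw text then d.modify p.1 0 (· + 1) else d) d)
          (km.foldl (fun d p => d.insert p.1 0)
            (PySem.Dict.empty : PySem.Dict String Int))).values = cs.map Prod.snd := by
      simp only [PySem.Dict.values, hitems, hcs, List.map_map]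
    simp only [hvals, hitems, gt_iff_lt]
    -- cs and its value list are nonempty; the head value is a count, hence ≥ 0
    obtain ⟨q, t, rfl⟩ : ∃ q t, km = q :: t := by
      cases km with
      | nil => exact absurd rfl hkm
      | cons q t => exact ⟨q, t, rfl⟩
    simp only [hcs, List.map_cons, PySem.List.max?_id_cons, Option.getD_some]
    have h0 : (0 : Int) ≤ ((q.2.countP (fun kw => PySem.Str.isIn kw text) : Nat) : Int) :=
      Int.natCast_nonneg _
    rw [List.foldl_cons, max_eq_right h0]

-- ===== VERDICT (by name: the statement is the Claim_ definition above) =====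
theorem get_keyword_best_match_py_spec : Claim_equal_get_keyword_best_match_py := by
  intro text keyword_map default_val _ hpre
  exact pv_main text keyword_map default_val hpre
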